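-- pv_equiv track=rewrite | github.com/clitkei1985/AXISAGI | modules/code_analysis/auto_refactor.py | _group_methods_by_functionality
-- ===== SOURCE A (Python) =====
-- from typing import List, Dict, Tuple, Optional
--
-- def _group_methods_by_functionality(methods: List[str]) -> Dict[str, List[str]]:
--     """Group methods by common functionality based on naming patterns."""
--     groups = {
--         "data": [],
--         "validation": [],
--         "processing": [],
--         "utility": [],
--         "api": [],
--         "database": [],
--         "other": []
--     }
--
--     for method in methods:
--         method_lower = method.lower()
--
--         if any(keyword in method_lower for keyword in ['get', 'set', 'load', 'save', 'fetch']):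
--             groups["data"].append(method)
--         elif any(keyword in method_lower for keyword in ['validate', 'check', 'verify', 'ensure']):
--             groups["validation"].append(method)
--         elif any(keyword in method_lower for keyword in ['process', 'transform', 'convert', 'parse']):
--             groups["processing"].append(method)
--         elif any(keyword in method_lower for keyword in ['format', 'clean', 'normalize', 'helper']):
--             groups["utility"].append(method)
--         elif any(keyword in method_lower for keyword in ['api', 'endpoint', 'route', 'request']):
--             groups["api"].append(method)
--         elif any(keyword in method_lower for keyword in ['db', 'database', 'query', 'insert', 'update', 'delete']):
--             groups["database"].append(method)
--         else:
--             groups["other"].append(method)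
--
--     # Remove empty groups
--     return {k: v for k, v in groups.items() if v}
-- ===== SOURCE B (Python) =====
-- from typing import List, Dict
--
-- _RULES = [
--     ("data", ['get', 'set', 'load', 'save', 'fetch']),
--     ("validation", ['validate', 'check', 'verify', 'ensure']),
--     ("processing", ['process', 'transform', 'convert', 'parse']),
--     ("utility", ['format', 'clean', 'normalize', 'helper']),
--     ("api", ['api', 'endpoint', 'route', 'request']),
--     ("database", ['db', 'database', 'query', 'insert', 'update', 'delete']),
-- ]
--
--
-- def _classify(method: str) -> str:
--     ml = method.lower()
--     for cat, keywords in _RULES: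
--         if any(k in ml for k in keywords):
--             return cat
--     return "other"
--
--
-- def _group_methods_by_functionality(methods: List[str]) -> Dict[str, List[str]]:
--     """Group methods by common functionality based on naming patterns."""
--     out = {}
--     for cat in [c for c, _ in _RULES] + ["other"]:
--         lst = [m for m in methods if _classify(m) == cat]
--         if lst:
--             out[cat] = lst
--     return out
-- ===== Notes on version B (the rewrite author's own statement) =====
-- stated objective: simpler
-- what changed: Replaces the seven-branch if/elif cascade that appends into a pre-built dict of empty groups (then strips empty ones) by a data-driven rules table with a first-match classifier and one per-category filter pass that only ever creates nonempty groups.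
import Mathlib
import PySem

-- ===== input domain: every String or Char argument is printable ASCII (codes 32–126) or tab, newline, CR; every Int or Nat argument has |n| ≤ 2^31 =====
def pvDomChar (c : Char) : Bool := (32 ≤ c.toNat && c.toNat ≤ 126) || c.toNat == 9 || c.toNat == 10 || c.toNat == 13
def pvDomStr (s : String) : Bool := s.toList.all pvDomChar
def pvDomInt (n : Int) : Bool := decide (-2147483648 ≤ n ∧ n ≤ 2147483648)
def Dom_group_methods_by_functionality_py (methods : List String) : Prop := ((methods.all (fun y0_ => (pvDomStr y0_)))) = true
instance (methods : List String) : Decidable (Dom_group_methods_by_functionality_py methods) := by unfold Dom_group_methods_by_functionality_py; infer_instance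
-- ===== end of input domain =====

-- B replaces A's seven-branch elif cascade appending into a pre-built dict by a rules-table
-- classifier and a per-category filter pass (objective: simpler decomposition, same cost).

-- ===== PORT A =====
-- loop body of A's 'for method in methods' (the if/elif cascade, branches in source order)
def pvStepA (groups : PySem.Dict String (List String)) (method : String) : PySem.Dict String (List String) :=
  let ml := PySem.Str.lower method
  if ["get", "set", "load", "save", "fetch"].any (fun kw => PySem.Str.isIn kw ml) then
    groups.modify "data" [] (· ++ [method])
  else if ["validate", "check", "verify", "ensure"].any (fun kw => PySem.Str.isIn kw ml) then
    groups.modify "validation" [] (· ++ [method])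
  else if ["process", "transform", "convert", "parse"].any (fun kw => PySem.Str.isIn kw ml) then
    groups.modify "processing" [] (· ++ [method])
  else if ["format", "clean", "normalize", "helper"].any (fun kw => PySem.Str.isIn kw ml) then
    groups.modify "utility" [] (· ++ [method])
  else if ["api", "endpoint", "route", "request"].any (fun kw => PySem.Str.isIn kw ml) then
    groups.modify "api" [] (· ++ [method])
  else if ["db", "database", "query", "insert", "update", "delete"].any (fun kw => PySem.Str.isIn kw ml) then
    groups.modify "database" [] (· ++ [method])
  else
    groups.modify "other" [] (· ++ [method])

def group_methods_by_functionality_py (methods : List String) : List (String × List String) :=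
  let groups : PySem.Dict String (List String) :=
    PySem.Dict.ofList [("data", []), ("validation", []), ("processing", []), ("utility", []),
                       ("api", []), ("database", []), ("other", [])]
  let groups := methods.foldl pvStepA groups
  -- dict comprehension {k: v for k, v in groups.items() if v}: the keys of groups are the seven
  -- distinct literals, so its items are exactly the nonempty-filtered items, in order (exact here)
  groups.items.filter (fun p => !p.2.isEmpty)

-- ===== PORT B =====
def pvRules : List (String × List String) :=
  [("data", ["get", "set", "load", "save", "fetch"]),
   ("validation", ["validate", "check", "verify", "ensure"]),
   ("processing", ["process", "transform", "convert", "parse"]),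
   ("utility", ["format", "clean", "normalize", "helper"]),
   ("api", ["api", "endpoint", "route", "request"]),
   ("database", ["db", "database", "query", "insert", "update", "delete"])]

def pvClassify (method : String) : String :=
  let ml := PySem.Str.lower method
  match pvRules.find? (fun r => r.2.any (fun kw => PySem.Str.isIn kw ml)) with
  | some r => r.1
  | none => "other"

def group_methods_by_functionality_py_alt (methods : List String) : List (String × List String) :=
  (pvRules.map Prod.fst ++ ["other"]).filterMap (fun c =>
    let lst := methods.filter (fun m => pvClassify m == c)
    if lst.isEmpty then none else some (c, lst))

-- ===== PRECONDITION & SPEC =====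
def Spec_group_methods_by_functionality_py (methods : List String) (out : List (String × List String)) : Prop := out = group_methods_by_functionality_py_alt methods
instance (methods : List String) (out : List (String × List String)) : Decidable (Spec_group_methods_by_functionality_py methods out) := by unfold Spec_group_methods_by_functionality_py; infer_instance

-- ===== CLAIM (what is proved, stated in full; the proofs are below) =====
def Claim_equal_group_methods_by_functionality_py : Prop := ∀ (methods : List String), Dom_group_methods_by_functionality_py methods → Spec_group_methods_by_functionality_py methods (group_methods_by_functionality_py methods)

-- ===== LEMMAS AND PROOFS =====

-- A's elif cascade as a string-valued classifier (proof-layer restatement of the cascade)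
def pvKeyOf (m : String) : String :=
  if ["get", "set", "load", "save", "fetch"].any (fun kw => PySem.Str.isIn kw (PySem.Str.lower m)) then "data"
  else if ["validate", "check", "verify", "ensure"].any (fun kw => PySem.Str.isIn kw (PySem.Str.lower m)) then "validation"
  else if ["process", "transform", "convert", "parse"].any (fun kw => PySem.Str.isIn kw (PySem.Str.lower m)) then "processing"
  else if ["format", "clean", "normalize", "helper"].any (fun kw => PySem.Str.isIn kw (PySem.Str.lower m)) then "utility"
  else if ["api", "endpoint", "route", "request"].any (fun kw => PySem.Str.isIn kw (PySem.Str.lower m)) then "api"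
  else if ["db", "database", "query", "insert", "update", "delete"].any (fun kw => PySem.Str.isIn kw (PySem.Str.lower m)) then "database"
  else "other"

-- B's rules-table classifier computes A's cascade
lemma pvClassify_eq_keyOf (m : String) : pvClassify m = pvKeyOf m := by
  unfold pvClassify pvKeyOf pvRules
  simp only [List.find?]
  cases h1 : (["get", "set", "load", "save", "fetch"].any (fun kw => PySem.Str.isIn kw (PySem.Str.lower m))) with
  | true => rfl
  | false =>
    cases h2 : (["validate", "check", "verify", "ensure"].any (fun kw => PySem.Str.isIn kw (PySem.Str.lower m))) with
    | true => rfl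
    | false =>
      cases h3 : (["process", "transform", "convert", "parse"].any (fun kw => PySem.Str.isIn kw (PySem.Str.lower m))) with
      | true => rfl
      | false =>
        cases h4 : (["format", "clean", "normalize", "helper"].any (fun kw => PySem.Str.isIn kw (PySem.Str.lower m))) with
        | true => rfl
        | false =>
          cases h5 : (["api", "endpoint", "route", "request"].any (fun kw => PySem.Str.isIn kw (PySem.Str.lower m))) with
          | true => rfl
          | false =>
            cases h6 : (["db", "database", "query", "insert", "update", "delete"].any (fun kw => PySem.Str.isIn kw (PySem.Str.lower m))) with
            | false => rfl
            | true => rfl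

-- one loop step of A on the seven-key dict state, per chosen category
lemma pvMod_data (l1 l2 l3 l4 l5 l6 l7 : List String) (m : String) :
    (PySem.Dict.mk [("data", l1), ("validation", l2), ("processing", l3), ("utility", l4), ("api", l5), ("database", l6), ("other", l7)]).modify "data" [] (· ++ [m]) = PySem.Dict.mk [("data", l1 ++ [m]), ("validation", l2), ("processing", l3), ("utility", l4), ("api", l5), ("database", l6), ("other", l7)] := rfl

lemma pvMod_validation (l1 l2 l3 l4 l5 l6 l7 : List String) (m : String) :
    (PySem.Dict.mk [("data", l1), ("validation", l2), ("processing", l3), ("utility", l4), ("api", l5), ("database", l6), ("other", l7)]).modify "validation" [] (· ++ [m]) = PySem.Dict.mk [("data", l1), ("validation", l2 ++ [m]), ("processing", l3), ("utility", l4), ("api", l5), ("database", l6), ("other", l7)] := rfl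

lemma pvMod_processing (l1 l2 l3 l4 l5 l6 l7 : List String) (m : String) :
    (PySem.Dict.mk [("data", l1), ("validation", l2), ("processing", l3), ("utility", l4), ("api", l5), ("database", l6), ("other", l7)]).modify "processing" [] (· ++ [m]) = PySem.Dict.mk [("data", l1), ("validation", l2), ("processing", l3 ++ [m]), ("utility", l4), ("api", l5), ("database", l6), ("other", l7)] := rfl

lemma pvMod_utility (l1 l2 l3 l4 l5 l6 l7 : List String) (m : String) :
    (PySem.Dict.mk [("data", l1), ("validation", l2), ("processing", l3), ("utility", l4), ("api", l5), ("database", l6), ("other", l7)]).modify "utility" [] (· ++ [m]) = PySem.Dict.mk [("data", l1), ("validation", l2), ("processing", l3), ("utility", l4 ++ [m]), ("api", l5), ("database", l6), ("other", l7)] := rfl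

lemma pvMod_api (l1 l2 l3 l4 l5 l6 l7 : List String) (m : String) :
    (PySem.Dict.mk [("data", l1), ("validation", l2), ("processing", l3), ("utility", l4), ("api", l5), ("database", l6), ("other", l7)]).modify "api" [] (· ++ [m]) = PySem.Dict.mk [("data", l1), ("validation", l2), ("processing", l3), ("utility", l4), ("api", l5 ++ [m]), ("database", l6), ("other", l7)] := rfl

lemma pvMod_database (l1 l2 l3 l4 l5 l6 l7 : List String) (m : String) :
    (PySem.Dict.mk [("data", l1), ("validation", l2), ("processing", l3), ("utility", l4), ("api", l5), ("database", l6), ("other", l7)]).modify "database" [] (· ++ [m]) = PySem.Dict.mk [("data", l1), ("validation", l2), ("processing", l3), ("utility", l4), ("api", l5), ("database", l6 ++ [m]), ("other", l7)] := rfl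

lemma pvMod_other (l1 l2 l3 l4 l5 l6 l7 : List String) (m : String) :
    (PySem.Dict.mk [("data", l1), ("validation", l2), ("processing", l3), ("utility", l4), ("api", l5), ("database", l6), ("other", l7)]).modify "other" [] (· ++ [m]) = PySem.Dict.mk [("data", l1), ("validation", l2), ("processing", l3), ("utility", l4), ("api", l5), ("database", l6), ("other", l7 ++ [m])] := rfl

-- invariant of A's loop: the dict state after processing ms appends, per category, exactly the
-- methods B's classifier sends to that category
lemma pvFoldA (ms : List String) (l1 l2 l3 l4 l5 l6 l7 : List String) :
    ms.foldl pvStepA (PySem.Dict.mk [("data", l1), ("validation", l2), ("processing", l3), ("utility", l4), ("api", l5), ("database", l6), ("other", l7)])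
    = PySem.Dict.mk [("data", l1 ++ ms.filter (fun m => pvClassify m == "data")),
        ("validation", l2 ++ ms.filter (fun m => pvClassify m == "validation")),
        ("processing", l3 ++ ms.filter (fun m => pvClassify m == "processing")),
        ("utility", l4 ++ ms.filter (fun m => pvClassify m == "utility")),
        ("api", l5 ++ ms.filter (fun m => pvClassify m == "api")),
        ("database", l6 ++ ms.filter (fun m => pvClassify m == "database")),
        ("other", l7 ++ ms.filter (fun m => pvClassify m == "other"))] := by
  induction ms generalizing l1 l2 l3 l4 l5 l6 l7 with
  | nil => simp
  | cons m ms ih =>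
    simp only [List.foldl_cons, List.filter_cons, pvClassify_eq_keyOf m, pvStepA, pvKeyOf]
    cases h1 : (["get", "set", "load", "save", "fetch"].any (fun kw => PySem.Str.isIn kw (PySem.Str.lower m))) with
    | true => simp only [reduceIte, String.reduceBEq, Bool.false_eq_true, if_false, if_true, pvMod_data, ih, List.append_assoc, List.singleton_append]
    | false =>
      cases h2 : (["validate", "check", "verify", "ensure"].any (fun kw => PySem.Str.isIn kw (PySem.Str.lower m))) with
      | true => simp only [reduceIte, String.reduceBEq, Bool.false_eq_true, if_false, if_true, pvMod_validation, ih, List.append_assoc, List.singleton_append]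
      | false =>
        cases h3 : (["process", "transform", "convert", "parse"].any (fun kw => PySem.Str.isIn kw (PySem.Str.lower m))) with
        | true => simp only [reduceIte, String.reduceBEq, Bool.false_eq_true, if_false, if_true, pvMod_processing, ih, List.append_assoc, List.singleton_append]
        | false =>
          cases h4 : (["format", "clean", "normalize", "helper"].any (fun kw => PySem.Str.isIn kw (PySem.Str.lower m))) with
          | true => simp only [reduceIte, String.reduceBEq, Bool.false_eq_true, if_false, if_true, pvMod_utility, ih, List.append_assoc, List.singleton_append]
          | false =>
            cases h5 : (["api", "endpoint", "route", "request"].any (fun kw => PySem.Str.isIn kw (PySem.Str.lower m))) with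
            | true => simp only [reduceIte, String.reduceBEq, Bool.false_eq_true, if_false, if_true, pvMod_api, ih, List.append_assoc, List.singleton_append]
            | false =>
              cases h6 : (["db", "database", "query", "insert", "update", "delete"].any (fun kw => PySem.Str.isIn kw (PySem.Str.lower m))) with
              | true => simp only [reduceIte, String.reduceBEq, Bool.false_eq_true, if_false, if_true, pvMod_database, ih, List.append_assoc, List.singleton_append]
              | false => simp only [reduceIte, String.reduceBEq, Bool.false_eq_true, if_false, if_true, pvMod_other, ih, List.append_assoc, List.singleton_append]

-- dropping empty groups commutes with listing the groups per category
lemma pvFinal (F : String → List String) (cs : List String) :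
    List.filter (fun p => !p.2.isEmpty) (cs.map (fun c => (c, F c)))
    = cs.filterMap (fun c =>
        let lst := F c
        if lst.isEmpty then none else some (c, lst)) := by
  induction cs with
  | nil => rfl
  | cons c cs ih => by_cases h : F c = [] <;> simp [List.filterMap_cons, h, ih]

-- ===== VERDICT (by name: the statement is the Claim_ definition above) =====
theorem group_methods_by_functionality_py_spec : Claim_equal_group_methods_by_functionality_py := by
  intro methods _
  unfold Spec_group_methods_by_functionality_py
  simp only [group_methods_by_functionality_py, group_methods_by_functionality_py_alt]
  rw [show PySem.Dict.ofList [("data", ([] : List String)), ("validation", []), ("processing", []),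
      ("utility", []), ("api", []), ("database", []), ("other", [])]
      = PySem.Dict.mk [("data", []), ("validation", []), ("processing", []), ("utility", []), ("api", []), ("database", []), ("other", [])] from rfl, pvFoldA]
  exact pvFinal (fun c => methods.filter (fun m => pvClassify m == c))
    ["data", "validation", "processing", "utility", "api", "database", "other"]
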